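-- pv_equiv track=rewrite | github.com/jannahalka/nlp-project | models/baseline_model/train.py | create_labels_mask
-- ===== SOURCE A (Python) =====
-- def create_labels_mask(word_ids, original_labels):
--     IGNORE_LABEL = -100
--     masked = []
--     prev_word_id: int | None = None
--
--     for word_id in word_ids:
--         if word_id is None or word_id == prev_word_id:
--             masked.append(IGNORE_LABEL)
--         else:
--             label = original_labels[word_id]
--             masked.append(label)
--
--         prev_word_id = word_id
--     return masked
-- ===== SOURCE B (Python) =====
-- def create_labels_mask(word_ids, original_labels):
--     IGNORE_LABEL = -100
--     out = []
--     i, n = 0, len(word_ids)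
--     while i < n:
--         key = word_ids[i]
--         j = i + 1
--         while j < n and word_ids[j] == key:
--             j += 1
--         run_len = j - i
--         if key is None:
--             out.extend([IGNORE_LABEL] * run_len)
--         else:
--             out.append(original_labels[key])
--             out.extend([IGNORE_LABEL] * (run_len - 1))
--         i = j
--     return out
-- ===== Notes on version B (the rewrite author's own statement) =====
-- stated objective: alternative
-- what changed: Replaces the element-by-element prev_word_id tracking loop with a run-based pass: an outer loop finds each maximal run of equal word_ids and emits the whole run's labels (one real label plus IGNORE padding, or all IGNORE for a None run) at once.
import Mathlib
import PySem

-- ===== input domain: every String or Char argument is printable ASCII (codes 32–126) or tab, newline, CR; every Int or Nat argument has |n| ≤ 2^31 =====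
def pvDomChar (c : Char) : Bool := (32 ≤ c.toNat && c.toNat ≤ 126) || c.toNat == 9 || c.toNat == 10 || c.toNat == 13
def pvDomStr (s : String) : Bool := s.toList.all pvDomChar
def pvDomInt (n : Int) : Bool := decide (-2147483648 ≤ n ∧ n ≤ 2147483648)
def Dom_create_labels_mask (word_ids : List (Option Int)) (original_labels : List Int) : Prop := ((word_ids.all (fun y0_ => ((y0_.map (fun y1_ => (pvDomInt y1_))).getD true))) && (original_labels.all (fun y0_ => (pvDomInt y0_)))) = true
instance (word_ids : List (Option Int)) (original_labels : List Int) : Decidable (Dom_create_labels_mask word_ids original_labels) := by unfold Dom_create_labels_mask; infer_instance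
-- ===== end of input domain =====

-- B replaces A's element-by-element prev_word_id tracking with a run-based pass
-- (outer loop per maximal run of equal word_ids, emitting a whole run at once); alternative decomposition, same cost.


-- ===== PORT A =====
-- A's loop: walk word_ids keeping prev_word_id; emit -100 for None or repeat, else original_labels[word_id]
-- (Python negative indexing via PySem.List.pyGet?; the none case is unreachable under Pre_).
def aGo (original_labels : List Int) : Option Int → List (Option Int) → List Int
  | _, [] => []
  | prev, w :: rest =>
    (match w with
     | none => (-100 : Int)
     | some i =>
       if some i == prev then (-100 : Int)
       else match PySem.List.pyGet? original_labels i with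
            | some v => v
            | none => 0) :: aGo original_labels w rest

def create_labels_mask (word_ids : List (Option Int)) (original_labels : List Int) : List Int :=
  aGo original_labels none word_ids

-- ===== PORT B =====
-- B's outer loop: take the maximal run of elements equal to the head, emit the run's segment, recurse on the rest.
def bGo (original_labels : List Int) : List (Option Int) → List Int
  | [] => []
  | k :: rest =>
    let runTail := rest.takeWhile (· == k)
    let runLen := runTail.length + 1
    (match k with
     | none => List.replicate runLen (-100 : Int)
     | some i =>
       (match PySem.List.pyGet? original_labels i with
        | some v => v
        | none => 0) :: List.replicate (runLen - 1) (-100 : Int)) ++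
    bGo original_labels (rest.dropWhile (· == k))
termination_by l => l.length
decreasing_by
  simp only [List.length_cons]
  exact Nat.lt_succ_of_le (List.length_dropWhile_le _ _)

def create_labels_mask_alt (word_ids : List (Option Int)) (original_labels : List Int) : List Int :=
  bGo original_labels word_ids

-- ===== PRECONDITION & SPEC =====
-- Pre_ excludes exactly the inputs where Python raises IndexError (a word id outside
-- Python's negative-indexing range of original_labels); both A and B raise there.
def Pre_create_labels_mask (word_ids : List (Option Int)) (original_labels : List Int) : Prop :=
  (word_ids.all (fun w =>
    match w with
    | none => true
    | some i => decide (-(original_labels.length : Int) ≤ i ∧ i < original_labels.length))) = true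
instance (word_ids : List (Option Int)) (original_labels : List Int) : Decidable (Pre_create_labels_mask word_ids original_labels) := by unfold Pre_create_labels_mask; infer_instance
def pvWitness_create_labels_mask : List (Option Int) × List Int :=
  ([some 0, some 0, none, some 1, some (-1)], [7, 8, 9])

def Spec_create_labels_mask (word_ids : List (Option Int)) (original_labels : List Int) (out : List Int) : Prop := out = create_labels_mask_alt word_ids original_labels
instance (word_ids : List (Option Int)) (original_labels : List Int) (out : List Int) : Decidable (Spec_create_labels_mask word_ids original_labels out) := by unfold Spec_create_labels_mask; infer_instance

-- ===== CLAIM (what is proved, stated in full; the proofs are below) =====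
def Claim_equal_create_labels_mask : Prop := ∀ (word_ids : List (Option Int)) (original_labels : List Int), Dom_create_labels_mask word_ids original_labels → Pre_create_labels_mask word_ids original_labels → Spec_create_labels_mask word_ids original_labels (create_labels_mask word_ids original_labels)

-- ===== LEMMAS AND PROOFS =====

-- consuming a run of elements equal to the current prev just emits -100s
theorem aGo_run (labels : List Int) (k : Option Int) (ws : List (Option Int)) :
    aGo labels k ws =
      List.replicate (ws.takeWhile (· == k)).length (-100 : Int) ++
        aGo labels k (ws.dropWhile (· == k)) := by
  induction ws with
  | nil => simp [aGo]
  | cons w rest ih =>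
    by_cases h : w = k
    · subst h
      simp only [List.takeWhile_cons, List.dropWhile_cons, beq_self_eq_true, if_pos]
      cases w with
      | none => simpa [aGo, List.replicate_succ] using ih
      | some i => simpa [aGo, List.replicate_succ] using ih
    · have hb : (w == k) = false := beq_eq_false_iff_ne.mpr h
      simp [hb]

theorem main_lemma (labels : List Int) (ws : List (Option Int)) (prev : Option Int)
    (h : ∀ w rest, ws = w :: rest → w = none ∨ (w == prev) = false) :
    aGo labels prev ws = bGo labels ws := by
  induction hn : ws.length using Nat.strong_induction_on generalizing ws prev with
  | _ n ih =>
  cases ws with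
  | nil => simp [aGo, bGo]
  | cons k rest =>
    have hrun := aGo_run labels k rest
    have hdrop : ∀ w r', rest.dropWhile (· == k) = w :: r' → w = none ∨ (w == k) = false := by
      intro w r' hw
      right
      have := List.head?_dropWhile_not (p := (· == k)) (l := rest)
      rw [hw] at this
      simpa using this
    have ihrec : aGo labels k (rest.dropWhile (· == k)) = bGo labels (rest.dropWhile (· == k)) := by
      apply ih (rest.dropWhile (· == k)).length _ _ k hdrop rfl
      calc (rest.dropWhile (· == k)).length ≤ rest.length := List.length_dropWhile_le _ _
        _ < n := by rw [← hn]; simp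
    rw [bGo.eq_def]
    cases k with
    | none =>
      show (-100 : Int) :: aGo labels none rest = _
      rw [hrun, ihrec]
      simp [List.replicate_succ]
    | some i =>
      have hk : (some i == prev) = false := by
        rcases h (some i) rest rfl with h1 | h1
        · simp at h1
        · exact h1
      show (if some i == prev then _ else _) :: aGo labels (some i) rest = _
      rw [hrun, ihrec]
      simp [hk]

-- ===== VERDICT (by name: the statement is the Claim_ definition above) =====
theorem create_labels_mask_spec : Claim_equal_create_labels_mask := by
  intro word_ids original_labels _ _
  unfold Spec_create_labels_mask create_labels_mask create_labels_mask_alt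
  apply main_lemma
  intro w rest hw
  cases w with
  | none => exact Or.inl rfl
  | some i => exact Or.inr (by simp)
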